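-- pv_equiv track=rewrite | github.com/alexandreandre/EYWAI | backend/app/modules/exports/infrastructure/export_dsn.py | validate_siret
-- ===== SOURCE A (Python) =====
-- from typing import Any, Dict, List, Optional, Tuple
--
-- def validate_siret(siret: Optional[str]) -> Tuple[bool, Optional[str]]:
--     if not siret:
--         return False, "SIRET manquant"
--     siret_clean = siret.replace(" ", "").replace("-", "")
--     if len(siret_clean) != 14:
--         return False, f"SIRET invalide : doit contenir 14 chiffres (actuellement {len(siret_clean)})"
--     if not siret_clean.isdigit():
--         return False, "SIRET invalide : doit contenir uniquement des chiffres"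
--
--     def luhn_check(number: str) -> bool:
--         digits = [int(d) for d in number]
--         checksum = sum(
--             d if i % 2 == 0 else (d * 2 if d < 5 else d * 2 - 9)
--             for i, d in enumerate(reversed(digits))
--         )
--         return checksum % 10 == 0
--
--     if not luhn_check(siret_clean):
--         return False, "SIRET invalide : clé de contrôle incorrecte"
--     return True, None
-- ===== SOURCE B (Python) =====
-- DOUBLE = (0, 2, 4, 6, 8, 1, 3, 5, 7, 9)
--
-- def validate_siret(siret):
--     if not siret:
--         return False, "SIRET manquant"
--     siret_clean = siret.replace(" ", "").replace("-", "")
--     if len(siret_clean) != 14: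
--         return False, f"SIRET invalide : doit contenir 14 chiffres (actuellement {len(siret_clean)})"
--     if not siret_clean.isdigit():
--         return False, "SIRET invalide : doit contenir uniquement des chiffres"
--     keep = sum(ord(c) - 48 for c in siret_clean[-1::-2])
--     doubled = sum(DOUBLE[ord(c) - 48] for c in siret_clean[-2::-2])
--     if (keep + doubled) % 10 != 0:
--         return False, "SIRET invalide : clé de contrôle incorrecte"
--     return True, None
-- ===== Notes on version B (the rewrite author's own statement) =====
-- stated objective: alternative
-- what changed: The single reversed-enumerate Luhn loop with an in-loop parity test and branch doubling is replaced by two positional stride-2 slices: odd positions summed directly and even positions summed through a precomputed doubled-digit table; the validation guards are unchanged.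
import Mathlib
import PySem

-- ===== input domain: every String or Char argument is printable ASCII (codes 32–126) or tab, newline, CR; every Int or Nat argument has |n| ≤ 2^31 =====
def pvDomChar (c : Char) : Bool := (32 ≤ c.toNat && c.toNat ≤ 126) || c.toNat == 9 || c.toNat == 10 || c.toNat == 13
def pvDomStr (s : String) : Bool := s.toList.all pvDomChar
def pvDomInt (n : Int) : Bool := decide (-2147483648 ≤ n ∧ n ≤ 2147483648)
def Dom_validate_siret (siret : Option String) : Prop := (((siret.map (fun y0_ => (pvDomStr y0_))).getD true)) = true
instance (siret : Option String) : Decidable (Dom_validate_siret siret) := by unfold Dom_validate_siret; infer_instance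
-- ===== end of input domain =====

-- B replaces A's single reversed-enumerate Luhn loop by two positional slices with a precomputed
-- doubled-digit table (alternative decomposition, same cost); the validation guards are unchanged.

-- ===== PORT A =====
-- int(d) on a single digit character; the .getD 0 is unreachable (guarded by isdigit)
def luhn_check (number : String) : Bool :=
  let digits : List Int := number.toList.map (fun d => (PySem.Int.ofChars? [d]).getD 0)
  let checksum : Int :=
    ((PySem.List.enumerate digits.reverse 0).map
      (fun p => if PySem.Int.mod p.1 2 = 0 then p.2
                else if p.2 < 5 then p.2 * 2 else p.2 * 2 - 9)).sum
  decide (PySem.Int.mod checksum 10 = 0)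

def validate_siret (siret : Option String) : Bool × Option String :=
  match siret with
  | none => (false, some "SIRET manquant")
  | some s =>
    if s = "" then (false, some "SIRET manquant")
    else
      let siret_clean := PySem.Str.replace (PySem.Str.replace s " " "") "-" ""
      if PySem.Str.len siret_clean ≠ 14 then
        (false, some ("SIRET invalide : doit contenir 14 chiffres (actuellement "
                       ++ PySem.Int.toStr (PySem.Str.len siret_clean) ++ ")"))
      else if !(PySem.Str.strIsdigit siret_clean) then
        (false, some "SIRET invalide : doit contenir uniquement des chiffres")
      else if !(luhn_check siret_clean) then
        (false, some "SIRET invalide : clé de contrôle incorrecte")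
      else (true, none)

-- ===== PORT B =====
def pvDOUBLE : List Int := [0, 2, 4, 6, 8, 1, 3, 5, 7, 9]

def validate_siret_alt (siret : Option String) : Bool × Option String :=
  match siret with
  | none => (false, some "SIRET manquant")
  | some s =>
    if s = "" then (false, some "SIRET manquant")
    else
      let siret_clean := PySem.Str.replace (PySem.Str.replace s " " "") "-" ""
      if PySem.Str.len siret_clean ≠ 14 then
        (false, some ("SIRET invalide : doit contenir 14 chiffres (actuellement "
                       ++ PySem.Int.toStr (PySem.Str.len siret_clean) ++ ")"))
      else if !(PySem.Str.strIsdigit siret_clean) then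
        (false, some "SIRET invalide : doit contenir uniquement des chiffres")
      else
        -- keep = sum(ord(c) - 48 for c in siret_clean[-1::-2])
        let keep : Int :=
          (((PySem.List.slice? siret_clean.toList (some (-1)) none (-2)).getD []).map
            (fun c => (c.toNat : Int) - 48)).sum
        -- doubled = sum(DOUBLE[ord(c) - 48] for c in siret_clean[-2::-2])
        let doubled : Int :=
          (((PySem.List.slice? siret_clean.toList (some (-2)) none (-2)).getD []).map
            (fun c => PySem.List.pyGetD pvDOUBLE ((c.toNat : Int) - 48) 0)).sum
        if PySem.Int.mod (keep + doubled) 10 ≠ 0 then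
          (false, some "SIRET invalide : clé de contrôle incorrecte")
        else (true, none)

-- ===== PRECONDITION & SPEC =====
def Spec_validate_siret (siret : Option String) (out : Bool × Option String) : Prop := out = validate_siret_alt siret
instance (siret : Option String) (out : Bool × Option String) : Decidable (Spec_validate_siret siret out) := by unfold Spec_validate_siret; infer_instance

-- ===== CLAIM (what is proved, stated in full; the proofs are below) =====
def Claim_equal_validate_siret : Prop := ∀ (siret : Option String), Dom_validate_siret siret → Spec_validate_siret siret (validate_siret siret)

-- ===== LEMMAS AND PROOFS =====

-- int(d) of a single digit character is its code point minus 48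
lemma digitVal (c : Char) (h : PySem.Chars.isdigit c = true) :
    (PySem.Int.ofChars? [c]).getD 0 = (c.toNat : Int) - 48 := by
  simp [PySem.Chars.isdigit, Char.le_def, UInt32.le_iff_toNat_le] at h
  have h1 : 48 ≤ c.toNat := h.1
  have h2 : c.toNat ≤ 57 := h.2
  have hc : Char.ofNat c.toNat = c := Char.ofNat_toNat c
  interval_cases hn : c.toNat <;> rw [← hc] <;> decide

lemma digit_ge (c : Char) (h : PySem.Chars.isdigit c = true) : 48 ≤ c.toNat := by
  simp [PySem.Chars.isdigit, Char.le_def, UInt32.le_iff_toNat_le] at h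
  exact h.1

lemma digit_le (c : Char) (h : PySem.Chars.isdigit c = true) : c.toNat ≤ 57 := by
  simp [PySem.Chars.isdigit, Char.le_def, UInt32.le_iff_toNat_le] at h
  exact h.2

-- the reversed-enumerate Luhn sum of a 14-digit string equals B's two slice sums
lemma luhn_sum_eq (cs : List Char) (h : cs.length = 14)
    (hd : ∀ c ∈ cs, PySem.Chars.isdigit c = true) :
    ((PySem.List.enumerate (cs.map (fun c => (c.toNat : Int) - 48)).reverse 0).map
        (fun p => if PySem.Int.mod p.1 2 = 0 then p.2
                  else if p.2 < 5 then p.2 * 2 else p.2 * 2 - 9)).sum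
      = (((PySem.List.slice? cs (some (-1)) none (-2)).getD []).map
          (fun c => (c.toNat : Int) - 48)).sum
        + (((PySem.List.slice? cs (some (-2)) none (-2)).getD []).map
            (fun c => PySem.List.pyGetD pvDOUBLE ((c.toNat : Int) - 48) 0)).sum := by
  match cs, h with
  | [a0,a1,a2,a3,a4,a5,a6,a7,a8,a9,a10,a11,a12,a13], _ =>
  have tbl : ∀ c : Char, PySem.Chars.isdigit c = true →
      PySem.List.pyGetD pvDOUBLE ((c.toNat : Int) - 48) 0
        = (if ((c.toNat : Int) - 48) < 5 then ((c.toNat : Int) - 48) * 2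
           else ((c.toNat : Int) - 48) * 2 - 9) := by
    intro c hc
    have h1 : (48:Int) ≤ (c.toNat:Int) := by exact_mod_cast digit_ge c hc
    have h2 : (c.toNat:Int) ≤ 57 := by exact_mod_cast digit_le c hc
    set d : Int := (c.toNat:Int) - 48 with hdd
    have hl : 0 ≤ d := by omega
    have hr : d ≤ 9 := by omega
    clear_value d
    interval_cases d <;> decide
  simp only [List.map_cons, List.map_nil, List.reverse_cons, List.reverse_nil,
    List.nil_append, List.cons_append, PySem.List.enumerate_cons, PySem.List.enumerate_nil,
    List.sum_cons, List.sum_nil]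
  norm_num [PySem.List.slice?, PySem.List.sliceIndices]
  rw [show Int.toNat 7 = 7 from rfl]
  simp [List.range_succ]
  rw [tbl a0 (hd a0 (by simp)), tbl a2 (hd a2 (by simp)), tbl a4 (hd a4 (by simp)),
      tbl a6 (hd a6 (by simp)), tbl a8 (hd a8 (by simp)), tbl a10 (hd a10 (by simp)),
      tbl a12 (hd a12 (by simp))]
  ring

-- ===== VERDICT (by name: the statement is the Claim_ definition above) =====
theorem validate_siret_spec : Claim_equal_validate_siret := by
  intro siret _dom
  unfold Spec_validate_siret
  match siret with
  | none => rfl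
  | some s =>
    unfold validate_siret validate_siret_alt
    by_cases hs : s = ""
    · subst hs; rfl
    · simp only [if_neg hs]
      generalize PySem.Str.replace (PySem.Str.replace s " " "") "-" "" = t
      by_cases hlen : PySem.Str.len t = 14
      · rw [if_neg (show ¬(PySem.Str.len t ≠ 14) from fun hcon => hcon hlen),
            if_neg (show ¬(PySem.Str.len t ≠ 14) from fun hcon => hcon hlen)]
        by_cases hdig : PySem.Str.strIsdigit t = true
        · rw [hdig]
          simp only [Bool.not_true, Bool.false_eq_true, if_false]
          have hlen' : t.toList.length = 14 := by
            simp only [PySem.Str.len_eq] at hlen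
            exact_mod_cast hlen
          have hall : ∀ c ∈ t.toList, PySem.Chars.isdigit c = true := by
            have hd := hdig
            simp only [PySem.Str.strIsdigit, PySem.Chars.strIsdigit, Bool.and_eq_true,
              List.all_eq_true] at hd
            exact hd.2
          have hmap : t.toList.map (fun d => (PySem.Int.ofChars? [d]).getD 0)
              = t.toList.map (fun c => (c.toNat : Int) - 48) :=
            List.map_congr_left (fun c hc => digitVal c (hall c hc))
          have hluhn : luhn_check t
              = decide (PySem.Int.mod
                  ((((PySem.List.slice? t.toList (some (-1)) none (-2)).getD []).map
                      (fun c => (c.toNat : Int) - 48)).sum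
                   + (((PySem.List.slice? t.toList (some (-2)) none (-2)).getD []).map
                      (fun c => PySem.List.pyGetD pvDOUBLE ((c.toNat : Int) - 48) 0)).sum) 10 = 0) := by
            unfold luhn_check
            simp only [hmap]
            rw [luhn_sum_eq t.toList hlen' hall]
          rw [hluhn]
          by_cases hz : PySem.Int.mod
              ((((PySem.List.slice? t.toList (some (-1)) none (-2)).getD []).map
                  (fun c => (c.toNat : Int) - 48)).sum
               + (((PySem.List.slice? t.toList (some (-2)) none (-2)).getD []).map
                  (fun c => PySem.List.pyGetD pvDOUBLE ((c.toNat : Int) - 48) 0)).sum) 10 = 0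
          · rw [if_neg (by simp only [decide_eq_true hz, Bool.not_true]; exact Bool.false_ne_true),
                if_neg (fun hcon => hcon hz)]
          · rw [if_pos (by simp only [decide_eq_false hz, Bool.not_false]),
                if_pos hz]
        · have hdig' : PySem.Str.strIsdigit t = false := by
            cases hb : PySem.Str.strIsdigit t
            · rfl
            · exact absurd hb hdig
          rw [hdig']
          simp only [Bool.not_false, if_true]
      · rw [if_pos hlen, if_pos hlen]
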